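-- pv_equiv track=rewrite | github.com/anamar3/ASP | src/valid_models.py | checkContradictingBodies
-- ===== SOURCE A (Python) =====
-- def checkContradictingBodies(factOfFirs,factsofSec):
--
--     for f1 in factOfFirs:
--         flag = True
--         if(f1.startswith("not")):
--             if(f1[len(f1)-1] == "."):
--              f1 = f1[4:-4]
--             else:
--              f1 = f1[4:-3]
--             flag = False
--         for f2 in factsofSec:
--             if(f2[len(f2)-1] == "."):
--               f2 = f2[:-4]
--             else:
--               f2 = f2[:-3]
--             if(f1 == f2 and not flag):
--                 return False
--             elif(f1 == f2 and flag):
--                 continue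
--             elif(f2.startswith("not") and not flag and f2[4:] == f1):
--                 continue
--             elif(f2.startswith("not") and flag and f2[4:] == f1):
--                 return False
--
--     return True
-- ===== SOURCE B (Python) =====
-- def checkContradictingBodies(factOfFirs, factsofSec):
--     # Sort-then-merge: map each fact to a signed key, sort both key lists,
--     # and detect a contradiction as a common key via a two-pointer merge scan.
--     keys1 = []
--     for f1 in factOfFirs:
--         if f1.startswith("not"):
--             keys1.append("-" + (f1[4:-4] if f1.endswith(".") else f1[4:-3]))
--         else:
--             keys1.append("+" + f1)
--     keys2 = []
--     for f2 in factsofSec: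
--         t = f2[:-4] if f2.endswith(".") else f2[:-3]
--         keys2.append("-" + t)
--         if t.startswith("not"):
--             keys2.append("+" + t[4:])
--     keys1.sort()
--     keys2.sort()
--     i = 0
--     j = 0
--     while i < len(keys1) and j < len(keys2):
--         if keys1[i] == keys2[j]:
--             return False
--         if keys1[i] < keys2[j]:
--             i += 1
--         else:
--             j += 1
--     return True
-- ===== Notes on version B (the rewrite author's own statement) =====
-- stated objective: faster
-- what changed: Replaced A's nested pair scan by a sort-then-merge algorithm: both lists are mapped to signed canonical keys, both key lists are sorted, and a contradiction is detected as a common key by a single two-pointer merge scan.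
-- outside the precondition, e.g. on checkContradictingBodies(['abc'], ['not abc xx', '']): A returns False, B returns False
import Mathlib
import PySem

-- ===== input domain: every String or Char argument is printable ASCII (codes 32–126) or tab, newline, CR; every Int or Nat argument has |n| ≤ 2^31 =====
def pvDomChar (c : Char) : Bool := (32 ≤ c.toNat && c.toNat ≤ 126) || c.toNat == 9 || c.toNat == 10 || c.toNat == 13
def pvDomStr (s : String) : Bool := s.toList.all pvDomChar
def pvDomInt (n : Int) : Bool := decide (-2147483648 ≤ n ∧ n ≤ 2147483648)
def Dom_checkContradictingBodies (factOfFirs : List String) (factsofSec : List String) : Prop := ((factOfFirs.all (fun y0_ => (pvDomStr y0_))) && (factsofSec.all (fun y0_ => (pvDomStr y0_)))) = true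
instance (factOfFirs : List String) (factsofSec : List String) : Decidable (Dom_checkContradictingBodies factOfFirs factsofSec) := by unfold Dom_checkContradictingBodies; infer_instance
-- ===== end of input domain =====

-- B replaces A's nested pair scan by sort-then-merge: both lists are mapped to signed
-- canonical keys, the key lists are sorted, and a contradiction is found as a common key
-- by a two-pointer merge scan; objective: faster.

-- ===== PORT A =====
-- f2[len(f2)-1] == "."  (on an empty string Python raises IndexError; PySem.Str.pyGet? is
-- none there, so the test is false and the port takes the else branch — those inputs are
-- excluded by Pre_checkContradictingBodies)
def aLastDot (s : String) : Bool :=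
  PySem.Str.pyGet? s ((PySem.Str.len s : Int) - 1) == some '.'

-- f2[:-4] / f2[:-3]
def aTrim (s : String) : String :=
  if aLastDot s then PySem.Str.slice s none (some (-4)) else PySem.Str.slice s none (some (-3))

-- f1[4:-4] / f1[4:-3]
def aStripNot (s : String) : String :=
  if aLastDot s then PySem.Str.slice s (some 4) (some (-4)) else PySem.Str.slice s (some 4) (some (-3))

-- the inner 'for f2 in factsofSec' loop: true = some branch executed 'return False'
def aInner (f1 : String) (flag : Bool) : List String → Bool
  | [] => false
  | f2 :: rest =>
      let t := aTrim f2
      if f1 == t && !flag then true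
      else if f1 == t && flag then aInner f1 flag rest
      else if PySem.Str.startswith t "not" && !flag && (PySem.Str.slice t (some 4) none == f1) then
        aInner f1 flag rest
      else if PySem.Str.startswith t "not" && flag && (PySem.Str.slice t (some 4) none == f1) then
        true
      else aInner f1 flag rest

-- the outer 'for f1 in factOfFirs' loop
def aGo (factsofSec : List String) : List String → Bool
  | [] => true
  | f1 :: rest =>
      if PySem.Str.startswith f1 "not" then
        if aInner (aStripNot f1) false factsofSec then false else aGo factsofSec rest
      else
        if aInner f1 true factsofSec then false else aGo factsofSec rest

def checkContradictingBodies (factOfFirs : List String) (factsofSec : List String) : Bool :=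
  aGo factsofSec factOfFirs

-- ===== PORT B =====
-- f1[4:-4] if f1.endswith(".") else f1[4:-3]
def bInnerStr (s : String) : String :=
  if PySem.Str.endswith s "." then PySem.Str.slice s (some 4) (some (-4)) else PySem.Str.slice s (some 4) (some (-3))

-- the local t = f2[:-4] if f2.endswith(".") else f2[:-3]
def bTrimB (s : String) : String :=
  if PySem.Str.endswith s "." then PySem.Str.slice s none (some (-4)) else PySem.Str.slice s none (some (-3))

-- the signed key B appends to keys1 for one f1
def bKey1 (f1 : String) : String :=
  if PySem.Str.startswith f1 "not" then "-" ++ bInnerStr f1 else "+" ++ f1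

-- the signed keys B appends to keys2 for one f2
def bKeys2 (f2 : String) : List String :=
  ("-" ++ bTrimB f2) ::
    (if PySem.Str.startswith (bTrimB f2) "not" then ["+" ++ PySem.Str.slice (bTrimB f2) (some 4) none] else [])

-- the while loop with pointers i, j, rendered on the remaining suffixes keys1[i:], keys2[j:]
def bMerge : List String → List String → Bool
  | [], _ => false
  | _ :: _, [] => false
  | x :: xs, y :: ys =>
      if x == y then true
      else if x < y then bMerge xs (y :: ys)
      else bMerge (x :: xs) ys

def checkContradictingBodies_alt (factOfFirs : List String) (factsofSec : List String) : Bool :=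
  let keys1 := PySem.List.sorted (factOfFirs.map bKey1) (fun x => x) false
  let keys2 := PySem.List.sorted (factsofSec.flatMap bKeys2) (fun x => x) false
  if bMerge keys1 keys2 then false else true

-- ===== PRECONDITION & SPEC =====
-- Pre_ excludes the inputs on which Python A raises IndexError (an empty string in
-- factsofSec reached with a nonempty factOfFirs); it is slightly wider than the exact
-- raise set because A may 'return False' before reaching the empty string — one such
-- excluded input on which A still returns is cited in claim.json.
def Pre_checkContradictingBodies (factOfFirs : List String) (factsofSec : List String) : Prop :=
  factOfFirs = [] ∨ ∀ f2 ∈ factsofSec, f2 ≠ ""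
instance (factOfFirs : List String) (factsofSec : List String) : Decidable (Pre_checkContradictingBodies factOfFirs factsofSec) := by unfold Pre_checkContradictingBodies; infer_instance

def pvWitness_checkContradictingBodies : List String × List String :=
  (["p(a).", "not q(b)."], ["not p(a).", "q(b)."])

def Spec_checkContradictingBodies (factOfFirs : List String) (factsofSec : List String) (out : Bool) : Prop := out = checkContradictingBodies_alt factOfFirs factsofSec
instance (factOfFirs : List String) (factsofSec : List String) (out : Bool) : Decidable (Spec_checkContradictingBodies factOfFirs factsofSec out) := by unfold Spec_checkContradictingBodies; infer_instance

-- ===== CLAIM =====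
def Claim_equal_checkContradictingBodies : Prop := ∀ (factOfFirs : List String) (factsofSec : List String), Dom_checkContradictingBodies factOfFirs factsofSec → Pre_checkContradictingBodies factOfFirs factsofSec → Spec_checkContradictingBodies factOfFirs factsofSec (checkContradictingBodies factOfFirs factsofSec)

-- ===== LEMMAS AND PROOFS =====

-- A's last-char test agrees with endswith on every string (on "" both are false).
theorem aLastDot_eq_endswith (s : String) : aLastDot s = PySem.Str.endswith s "." := by
  unfold aLastDot
  simp only [PySem.Str.pyGet?_eq, PySem.Str.len_eq, PySem.Str.endswith_eq]
  generalize s.toList = cs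
  cases cs with
  | nil => decide
  | cons a t =>
    have h : ((a :: t).length : Int) - 1 = ((t.length : Nat) : Int) := by simp
    rw [h]
    simp only [PySem.Chars.pyGet?_eq_listPyGet?, PySem.List.pyGet?_natCast]
    show ((a :: t)[t.length]? == some '.') = PySem.Chars.endswith (a :: t) ".".toList
    have h1 : (a :: t)[t.length]? = (a :: t).getLast? := by
      rw [List.getLast?_eq_getElem?]; simp
    rw [h1]
    by_cases hsuf : ['.'] <:+ (a :: t)
    · rw [PySem.Chars.endswith_iff (a :: t) ".".toList |>.mpr hsuf]
      obtain ⟨pre, hp⟩ := hsuf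
      simp [← hp, List.getLast?_append]
    · have he : PySem.Chars.endswith (a :: t) ".".toList = false := by
        cases he : PySem.Chars.endswith (a :: t) ".".toList
        · rfl
        · exact absurd (PySem.Chars.endswith_iff _ _ |>.mp he) hsuf
      rw [he]
      simp only [beq_eq_false_iff_ne, ne_eq]
      intro hl
      obtain ⟨ys, hys⟩ := List.getLast?_eq_some_iff.mp hl
      exact absurd ⟨ys, hys.symm⟩ hsuf

theorem aStripNot_eq_bInnerStr : aStripNot = bInnerStr := by
  funext s; simp [aStripNot, bInnerStr, aLastDot_eq_endswith]

-- negative f1: the inner loop hits 'return False' exactly when some trimmed f2 equals f1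
theorem aInner_false_eq (f1 : String) (f2s : List String) :
    aInner f1 false f2s = f2s.any (fun f2 => f1 == aTrim f2) := by
  induction f2s with
  | nil => rfl
  | cons f2 rest ih =>
    by_cases h : f1 = aTrim f2
    · simp [aInner, h]
    · simp only [aInner, List.any_cons]
      split_ifs <;> simp_all

-- positive f1 (not "not"-prefixed): the inner loop hits 'return False' exactly when some
-- trimmed f2 is "not"-prefixed with body f1
theorem aInner_true_eq (f1 : String) (h : PySem.Str.startswith f1 "not" = false) (f2s : List String) :
    aInner f1 true f2s
      = f2s.any (fun f2 => PySem.Str.startswith (aTrim f2) "not"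
          && (PySem.Str.slice (aTrim f2) (some 4) none == f1)) := by
  induction f2s with
  | nil => rfl
  | cons f2 rest ih =>
    by_cases he : f1 = aTrim f2
    · have hp : PySem.Chars.startswith f1.toList ['n','o','t'] = false := by simpa using h
      simp only [aInner, List.any_cons, ← he, ih]
      simp [hp]
    · simp only [aInner, List.any_cons]
      split_ifs <;> simp_all

-- signed keys: same sign is injective, different signs never collide
theorem dash_inj (a b : String) : (("-" ++ a) == ("-" ++ b)) = (a == b) := by
  rw [Bool.eq_iff_iff, beq_iff_eq, beq_iff_eq]
  constructor
  · intro h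
    have := congrArg String.toList h
    simpa [String.toList_inj] using this
  · intro h; rw [h]

theorem plus_inj (a b : String) : (("+" ++ a) == ("+" ++ b)) = (a == b) := by
  rw [Bool.eq_iff_iff, beq_iff_eq, beq_iff_eq]
  constructor
  · intro h
    have := congrArg String.toList h
    simpa [String.toList_inj] using this
  · intro h; rw [h]

theorem dash_ne_plus (a b : String) : ("-" ++ a) ≠ ("+" ++ b) := by
  intro h
  have := congrArg String.toList h
  simp at this

theorem plus_ne_dash (a b : String) : ("+" ++ a) ≠ ("-" ++ b) := by
  intro h
  have := congrArg String.toList h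
  simp at this

theorem any_congr_mem {α : Type} (l : List α) (p q : α → Bool) (h : ∀ x ∈ l, p x = q x) :
    l.any p = l.any q := by
  induction l with
  | nil => rfl
  | cons a t ih =>
    simp only [List.any_cons, h a (List.mem_cons_self), ih (fun x hx => h x (List.mem_cons_of_mem a hx))]

-- membership of a signed key among the keys of one f2
theorem contains_bKeys2_neg (x f2 : String) :
    (bKeys2 f2).contains ("-" ++ x) = (x == bTrimB f2) := by
  unfold bKeys2
  simp only [List.contains_cons, dash_inj]
  have h2 : (List.contains (if PySem.Str.startswith (bTrimB f2) "not" then ["+" ++ PySem.Str.slice (bTrimB f2) (some 4) none] else []) ("-" ++ x)) = false := by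
    split
    · simp only [List.contains_cons, List.contains_nil, Bool.or_false, beq_eq_false_iff_ne, ne_eq]
      exact dash_ne_plus _ _
    · rfl
  rw [h2, Bool.or_false]

theorem contains_bKeys2_pos (x f2 : String) :
    (bKeys2 f2).contains ("+" ++ x)
      = (PySem.Str.startswith (bTrimB f2) "not" && (PySem.Str.slice (bTrimB f2) (some 4) none == x)) := by
  unfold bKeys2
  simp only [List.contains_cons]
  have h1 : (("+" ++ x) == ("-" ++ bTrimB f2)) = false := by
    simp only [beq_eq_false_iff_ne, ne_eq]
    exact plus_ne_dash _ _
  rw [h1, Bool.false_or]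
  split
  next hs =>
    simp only [List.contains_cons, List.contains_nil, Bool.or_false, hs, Bool.true_and, plus_inj]
    rw [Bool.eq_iff_iff, beq_iff_eq, beq_iff_eq]
    exact eq_comm
  next hs =>
    simp only [List.contains_nil]
    cases hv : PySem.Str.startswith (bTrimB f2) "not"
    · rfl
    · exact absurd hv hs

-- the merge scan on two (≤)-sorted lists detects exactly a common element
theorem bMerge_eq (xs ys : List String) (hx : xs.Pairwise (· ≤ ·)) (hy : ys.Pairwise (· ≤ ·)) :
    bMerge xs ys = xs.any (fun x => ys.contains x) := by
  induction xs generalizing ys with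
  | nil => simp [bMerge]
  | cons x xs' ihx =>
    induction ys with
    | nil => simp [bMerge]
    | cons y ys' ihy =>
      have hx' : xs'.Pairwise (· ≤ ·) := hx.tail
      have hy' : ys'.Pairwise (· ≤ ·) := hy.tail
      by_cases hxy : x = y
      · simp [bMerge, hxy]
      · by_cases hlt : x < y
        · have hnot : (y :: ys').contains x = false := by
            simp only [List.contains_eq_mem, decide_eq_false_iff_not]
            intro hm
            rcases List.mem_cons.mp hm with h | h
            · exact hxy h
            · have : y ≤ x := List.rel_of_pairwise_cons hy h
              exact absurd hlt (not_lt.mpr this)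
          have hb : bMerge (x :: xs') (y :: ys') = bMerge xs' (y :: ys') := by
            simp [bMerge, hxy, hlt]
          rw [hb, ihx (y :: ys') hx' hy]
          simp only [List.any_cons, hnot, Bool.false_or]
        · -- y < x: y cannot occur in x :: xs'
          have hylt : y < x := lt_of_le_of_ne (not_lt.mp hlt) (fun h => hxy h.symm)
          have hb : bMerge (x :: xs') (y :: ys') = bMerge (x :: xs') ys' := by
            simp [bMerge, hxy, hlt]
          rw [hb, ihy hy']
          apply any_congr_mem
          intro z hz
          have hyz : y < z := by
            rcases List.mem_cons.mp hz with h | h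
            · exact h ▸ hylt
            · exact lt_of_lt_of_le hylt (List.rel_of_pairwise_cons hx h)
          simp only [List.contains_eq_mem, List.mem_cons]
          have : z ≠ y := fun h => absurd (h ▸ hyz) (lt_irrefl y)
          simp [this]

-- B's key for f1 occurs among the keys of f2s exactly when A's inner loop returns False
theorem aTrim_eq_bTrimB : aTrim = bTrimB := by
  funext s; simp [aTrim, bTrimB, aLastDot_eq_endswith]

theorem key1_mem_eq_trigger (f1 : String) (f2s : List String) :
    (f2s.flatMap bKeys2).contains (bKey1 f1)
      = (if PySem.Str.startswith f1 "not" then aInner (aStripNot f1) false f2s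
         else aInner f1 true f2s) := by
  by_cases hn : PySem.Str.startswith f1 "not" = true
  · rw [if_pos hn, aInner_false_eq, aStripNot_eq_bInnerStr, aTrim_eq_bTrimB]
    simp only [bKey1, hn, if_pos]
    induction f2s with
    | nil => rfl
    | cons f2 rest ih =>
      simp only [List.flatMap_cons, List.any_cons]
      rw [List.contains_append, ih, contains_bKeys2_neg]
  · have hn' : PySem.Str.startswith f1 "not" = false := by
      cases hv : PySem.Str.startswith f1 "not"
      · rfl
      · exact absurd hv hn
    rw [if_neg hn, aInner_true_eq f1 hn', aTrim_eq_bTrimB]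
    simp only [bKey1, hn', Bool.false_eq_true, if_false]
    induction f2s with
    | nil => rfl
    | cons f2 rest ih =>
      simp only [List.flatMap_cons, List.any_cons]
      rw [List.contains_append, ih, contains_bKeys2_pos]

-- the outer loop of A returns True exactly when no f1 triggers
theorem aGo_eq (f2s f1s : List String) :
    aGo f2s f1s
      = !(f1s.any (fun f1 => if PySem.Str.startswith f1 "not" then aInner (aStripNot f1) false f2s
                             else aInner f1 true f2s)) := by
  induction f1s with
  | nil => rfl
  | cons f1 rest ih =>
    simp only [aGo, List.any_cons]
    split_ifs with h <;> (try rw [ih]) <;> simp_all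

theorem checkContradictingBodies_spec_aux (f1s f2s : List String) :
    checkContradictingBodies f1s f2s = checkContradictingBodies_alt f1s f2s := by
  unfold checkContradictingBodies checkContradictingBodies_alt
  dsimp only
  rw [aGo_eq]
  rw [bMerge_eq _ _ (by simpa using PySem.List.sorted_pairwise (f1s.map bKey1) (fun x => x) )
        (by simpa using PySem.List.sorted_pairwise (f2s.flatMap bKeys2) (fun x => x))]
  have hmem : (PySem.List.sorted (f1s.map bKey1) (fun x => x) false).any
        (fun x => (PySem.List.sorted (f2s.flatMap bKeys2) (fun x => x) false).contains x)
      = (f1s.map bKey1).any (fun x => (f2s.flatMap bKeys2).contains x) := by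
    rw [Bool.eq_iff_iff, List.any_eq_true, List.any_eq_true]
    constructor
    · rintro ⟨x, hx, hc⟩
      refine ⟨x, (PySem.List.mem_sorted _ _ _ _).mp hx, ?_⟩
      simp only [List.contains_eq_mem, decide_eq_true_iff] at hc ⊢
      exact (PySem.List.mem_sorted _ _ _ _).mp hc
    · rintro ⟨x, hx, hc⟩
      refine ⟨x, (PySem.List.mem_sorted _ _ _ _).mpr hx, ?_⟩
      simp only [List.contains_eq_mem, decide_eq_true_iff] at hc ⊢
      exact (PySem.List.mem_sorted _ _ _ _).mpr hc
  rw [hmem, List.any_map]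
  have : (f1s.any (fun f1 => (f2s.flatMap bKeys2).contains (bKey1 f1)))
      = (f1s.any (fun f1 => if PySem.Str.startswith f1 "not" then aInner (aStripNot f1) false f2s else aInner f1 true f2s)) := by
    apply any_congr_mem
    intro f1 _
    exact key1_mem_eq_trigger f1 f2s
  simp only [Function.comp_def] at this ⊢
  simp only [this]
  cases f1s.any (fun f1 => if PySem.Str.startswith f1 "not" then aInner (aStripNot f1) false f2s else aInner f1 true f2s) <;> simp

-- ===== VERDICT =====
theorem checkContradictingBodies_spec : Claim_equal_checkContradictingBodies := by
  intro f1s f2s _ _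
  exact checkContradictingBodies_spec_aux f1s f2s
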